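-- pv_equiv track=rewrite | github.com/Omkar-562000/PRESAGE | backend/services/report_service.py | _severity_breakdown
-- ===== SOURCE A (Python) =====
-- from collections import Counter
--
-- def _severity_breakdown(incidents: list[dict]) -> dict:
--     counter = Counter(incident.get("Severity", "Unknown") for incident in incidents)
--     order = ["Critical", "High", "Medium", "Low"]
--     result = {label: counter[label] for label in order if counter[label]}
--     for label, count in sorted(counter.items()):
--         if label not in result:
--             result[label] = count
--     return result
-- ===== SOURCE B (Python) =====
-- from collections import Counter
--
-- def _severity_breakdown(incidents: list[dict]) -> dict:
--     counter = Counter(incident.get("Severity", "Unknown") for incident in incidents)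
--     order = ["Critical", "High", "Medium", "Low"]
--
--     def rank(item):
--         label = item[0]
--         if label in order:
--             return (order.index(label), "")
--         return (len(order), label)
--
--     return dict(sorted(counter.items(), key=rank))
-- ===== Notes on version B (the rewrite author's own statement) =====
-- stated objective: alternative
-- what changed: A builds the result in two differently-shaped passes (fixed-order comprehension over the priority list, then a sorted pass over the remainder with a not-in check); B makes one sorted pass over counter.items() with a composite rank key ((priority index, '') for known labels, (len(order), label) for unknown ones) and inserts in that order.
import Mathlib
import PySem

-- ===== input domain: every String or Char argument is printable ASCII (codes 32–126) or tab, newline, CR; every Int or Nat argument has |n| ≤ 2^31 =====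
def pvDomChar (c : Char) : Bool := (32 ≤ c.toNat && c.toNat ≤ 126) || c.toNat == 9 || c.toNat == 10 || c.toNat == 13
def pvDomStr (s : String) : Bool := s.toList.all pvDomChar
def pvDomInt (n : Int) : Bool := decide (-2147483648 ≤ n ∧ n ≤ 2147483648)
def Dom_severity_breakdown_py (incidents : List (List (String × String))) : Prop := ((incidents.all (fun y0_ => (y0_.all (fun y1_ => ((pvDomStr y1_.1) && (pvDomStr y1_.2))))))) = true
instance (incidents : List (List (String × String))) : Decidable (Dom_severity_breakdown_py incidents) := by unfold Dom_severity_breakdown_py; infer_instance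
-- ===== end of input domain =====

-- B changes A's two-phase construction (fixed-order pass + sorted remainder pass) into a
-- single rank-keyed sorted pass; same cost, different decomposition.

-- ===== PORT A =====
-- the 'order' list both Python versions define locally
def pvOrder : List String := ["Critical", "High", "Medium", "Low"]

-- incident.get("Severity", "Unknown")
def pvSevOf (incident : List (String × String)) : String :=
  (PySem.Dict.mk incident).getD "Severity" "Unknown"

def severity_breakdown_py (incidents : List (List (String × String))) : List (String × Int) :=
  let counter := PySem.Dict.counter (incidents.map pvSevOf)
  let result := pvOrder.foldl
    (fun r label => if counter.getD label 0 ≠ 0 then r.insert label (counter.getD label 0) else r)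
    PySem.Dict.empty
  let result := (PySem.List.sorted counter.items (fun p => toLex p)).foldl
    (fun r p => if r.contains p.1 then r else r.insert p.1 p.2) result
  result.items

-- ===== PORT B =====
-- rank(item): (order.index(label), "") for a known label, (len(order), label) otherwise
def pvRankOf (label : String) : Lex (Int × String) :=
  match PySem.List.index? pvOrder label with
  | some i => toLex ((i : Int), "")
  | none => toLex (((pvOrder.length : Int)), label)

def severity_breakdown_py_alt (incidents : List (List (String × String))) : List (String × Int) :=
  let counter := PySem.Dict.counter (incidents.map pvSevOf)
  ((PySem.List.sorted counter.items (fun p => pvRankOf p.1)).foldl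
      (fun r p => r.insert p.1 p.2) PySem.Dict.empty).items

-- ===== PRECONDITION & SPEC =====
def Spec_severity_breakdown_py (incidents : List (List (String × String))) (out : List (String × Int)) : Prop := out = severity_breakdown_py_alt incidents
instance (incidents : List (List (String × String))) (out : List (String × Int)) : Decidable (Spec_severity_breakdown_py incidents out) := by unfold Spec_severity_breakdown_py; infer_instance

-- ===== CLAIM (what is proved, stated in full; the proofs are below) =====
def Claim_equal_severity_breakdown_py : Prop := ∀ (incidents : List (List (String × String))), Dom_severity_breakdown_py incidents → Spec_severity_breakdown_py incidents (severity_breakdown_py incidents)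

-- ===== LEMMAS AND PROOFS =====

-- A's first loop: the guarded insert over 'order' is a plain insert over the filtered list
lemma foldl_insert_if_eq_filter (l : List String) (c : PySem.Dict String Int)
    (r : PySem.Dict String Int) :
    l.foldl (fun r label => if c.getD label 0 ≠ 0 then r.insert label (c.getD label 0) else r) r
      = (l.filter (fun label => decide (c.getD label 0 ≠ 0))).foldl
          (fun r label => r.insert label (c.getD label 0)) r := by
  induction l generalizing r with
  | nil => rfl
  | cons a t ih =>
    rw [List.foldl_cons, List.filter_cons]
    by_cases h : c.getD a 0 ≠ 0
    · rw [if_pos h, if_pos (by simpa using h), List.foldl_cons, ih]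
    · rw [if_neg h, if_neg (by simpa using h), ih]

-- A's second loop: the contains-guarded insert over a key-nodup list is a plain insert
-- over the list filtered by the INITIAL dict's contains
lemma foldl_skip_contains (L : List (String × Int)) (r : PySem.Dict String Int)
    (hnd : (L.map Prod.fst).Nodup) :
    L.foldl (fun r p => if r.contains p.1 then r else r.insert p.1 p.2) r
      = (L.filter (fun p => !r.contains p.1)).foldl (fun r p => r.insert p.1 p.2) r := by
  induction L generalizing r with
  | nil => rfl
  | cons a t ih =>
    simp only [List.map_cons, List.nodup_cons] at hnd
    obtain ⟨ha, hnd'⟩ := hnd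
    rw [List.foldl_cons, List.filter_cons]
    by_cases h : r.contains a.1
    · rw [if_pos h, if_neg (by simp [h]), ih r hnd']
    · rw [if_neg h, if_pos (by simp [h]), List.foldl_cons, ih _ hnd']
      congr 1
      apply List.filter_congr
      intro p hp
      have hne : p.1 ≠ a.1 := fun e => ha (e ▸ List.mem_map_of_mem hp)
      simp [PySem.Dict.contains_insert, hne]

theorem severity_breakdown_core (incidents : List (List (String × String))) :
    severity_breakdown_py incidents = severity_breakdown_py_alt incidents := by
  unfold severity_breakdown_py severity_breakdown_py_alt
  simp only []
  set xs := incidents.map pvSevOf with hxs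
  set c := PySem.Dict.counter xs with hc
  set K := PySem.Set.ofList xs with hK
  set f : String → String × Int := fun l => (l, c.getD l 0) with hf
  -- facts about the counter
  have hitems : c.items = K.map f := by
    rw [hc, PySem.Dict.items_counter]
    exact List.map_congr_left (fun k _ => by simp [hf, hc, PySem.Dict.getD_counter])
  have hKnd : K.Nodup := PySem.Set.nodup_ofList xs
  have hkeysnd : (c.items.map Prod.fst).Nodup := by
    rw [hitems, List.map_map]
    have he : (Prod.fst ∘ f) = fun l : String => l := rfl
    rw [he, List.map_id']
    exact hKnd
  have hmemK : ∀ l : String, (c.getD l 0 ≠ 0) ↔ l ∈ K := by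
    intro l
    rw [hc, PySem.Dict.getD_counter, hK, PySem.Set.mem_ofList]
    simp [List.count_eq_zero]
  -- the known part
  set kl := pvOrder.filter (fun label => decide (c.getD label 0 ≠ 0)) with hkl
  have hordnd : pvOrder.Nodup := by decide
  have hklnd : kl.Nodup := List.Nodup.sublist List.filter_sublist hordnd
  have hklmem : ∀ l : String, l ∈ kl ↔ l ∈ pvOrder ∧ l ∈ K := by
    intro l
    rw [hkl, List.mem_filter]
    simp [hmemK l]
  -- the sorted list of A's second loop
  set L := PySem.List.sorted c.items (fun p => toLex p) with hL
  have hLp : L.Perm c.items := PySem.List.sorted_perm c.items _ _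
  have hLkeysnd : (L.map Prod.fst).Nodup := ((hLp.map Prod.fst).nodup_iff).mpr hkeysnd
  have hLfst : L.Pairwise (fun a b => a.1 < b.1) := by
    have hle : L.Pairwise (fun a b => (toLex a : Lex (String × Int)) ≤ toLex b) :=
      PySem.List.sorted_pairwise c.items _
    have hne : L.Pairwise (fun a b => a.1 ≠ b.1) := List.pairwise_map.mp hLkeysnd
    exact (hle.and hne).imp (fun {a b} h => by
      rcases lt_or_eq_of_le h.1 with hlt | heq
      · rcases Prod.Lex.lt_iff.mp hlt with h1 | ⟨h1, _⟩
        · exact h1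
        · exact absurd h1 h.2
      · exact absurd (congrArg Prod.fst (toLex.injective heq)) h.2)
  set Lu := L.filter (fun p => !pvOrder.contains p.1) with hLu
  -- rank facts
  have hrankord : pvOrder.Pairwise (fun a b => pvRankOf a < pvRankOf b) := by decide
  have hrankunk : ∀ s : String, pvOrder.contains s = false →
      pvRankOf s = toLex (((pvOrder.length : Int)), s) := by
    intro s h
    have hm : s ∉ pvOrder := by simpa using h
    simp [pvRankOf, PySem.List.index?_eq_idxOf?, List.idxOf?_eq_none_iff.mpr hm]
  have hrankcross : ∀ l ∈ pvOrder, ∀ s : String,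
      pvRankOf l < toLex (((pvOrder.length : Int)), s) := by
    intro l hl s
    cases hi : List.idxOf? l pvOrder with
    | none => exact absurd hl (List.idxOf?_eq_none_iff.mp hi)
    | some i =>
      obtain ⟨hk, -, -⟩ := PySem.List.getElem_of_index?_eq_some (xs := pvOrder) (v := l) (k := i)
        (by rw [PySem.List.index?_eq_idxOf?]; exact hi)
      have hr : pvRankOf l = toLex ((i : Int), "") := by
        simp [pvRankOf, PySem.List.index?_eq_idxOf?, hi]
      rw [hr, Prod.Lex.lt_iff]
      exact Or.inl (by simpa using (show (i : Int) < pvOrder.length by exact_mod_cast hk))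
  -- the target list
  have hperm : (kl.map f ++ Lu).Perm c.items := by
    have h1 : kl.Perm (K.filter (fun l => pvOrder.contains l)) := by
      refine (List.perm_ext_iff_of_nodup hklnd (List.Nodup.sublist List.filter_sublist hKnd)).mpr ?_
      intro a
      rw [hklmem a, List.mem_filter]
      simp [and_comm]
    have h2 : c.items.filter (fun p => pvOrder.contains p.1)
        = (K.filter (fun l => pvOrder.contains l)).map f := by
      rw [hitems, List.filter_map]
      rfl
    have h3 : Lu.Perm (c.items.filter (fun p => !pvOrder.contains p.1)) :=
      hLp.filter _
    exact (List.Perm.append (h2 ▸ (h1.map f)) h3).trans (List.filter_append_perm _ c.items)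
  have hpw : (kl.map f ++ Lu).Pairwise (fun a b => pvRankOf a.1 < pvRankOf b.1) := by
    rw [List.pairwise_append]
    refine ⟨?_, ?_, ?_⟩
    · rw [List.pairwise_map]
      exact List.Pairwise.sublist List.filter_sublist hrankord
    · have hpwu : Lu.Pairwise (fun a b => a.1 < b.1) :=
        List.Pairwise.sublist List.filter_sublist hLfst
      refine hpwu.imp_of_mem (fun {a b} ha hb h => ?_)
      have ha' := (List.mem_filter.mp (hLu ▸ ha)).2
      have hb' := (List.mem_filter.mp (hLu ▸ hb)).2
      rw [hrankunk a.1 (by simpa using ha'), hrankunk b.1 (by simpa using hb')]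
      rw [Prod.Lex.lt_iff]
      exact Or.inr ⟨rfl, h⟩
    · intro a ha b hb
      obtain ⟨l, hl, rfl⟩ := List.mem_map.mp ha
      have hlo : l ∈ pvOrder := ((hklmem l).mp hl).1
      have hb' := (List.mem_filter.mp (hLu ▸ hb)).2
      rw [show (f l).1 = l from rfl, hrankunk b.1 (by simpa using hb')]
      exact hrankcross l hlo b.1
  have hM : PySem.List.sorted c.items (fun p => pvRankOf p.1) = kl.map f ++ Lu :=
    PySem.List.sorted_eq_of_perm_of_pairwise_lt _ _ _ hperm hpw
  -- A's first loop builds exactly the known part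
  set r1 : PySem.Dict String Int :=
    kl.foldl (fun r label => r.insert label (c.getD label 0)) PySem.Dict.empty with hr1
  have hr1items : r1.items = kl.map f := by
    have h := PySem.Dict.items_foldl_insert_fresh kl (fun l => l) (fun l => c.getD l 0)
      PySem.Dict.empty (fun a _ => by simp) (by rw [List.map_id']; exact hklnd)
    simpa using h
  have hr1keys : r1.keys = kl := by
    have hk : r1.keys = r1.items.map Prod.fst := rfl
    rw [hk, hr1items, List.map_map]
    have he : (Prod.fst ∘ f) = fun l : String => l := rfl
    rw [he, List.map_id']
  have hr1cont : ∀ p ∈ L, r1.contains p.1 = pvOrder.contains p.1 := by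
    intro p hp
    have hpK : p.1 ∈ K := by
      have hpi : p ∈ c.items := hLp.subset hp
      rw [hitems] at hpi
      obtain ⟨k, hk, he⟩ := List.mem_map.mp hpi
      rw [← he]
      exact hk
    rw [PySem.Dict.contains_eq_decide_mem_keys, hr1keys]
    by_cases ho : p.1 ∈ pvOrder <;> simp [hklmem p.1, ho, hpK]
  have hfe : L.filter (fun p => !r1.contains p.1) = Lu := by
    apply List.filter_congr
    intro p hp
    rw [hr1cont p hp]
  have hfr2 : ∀ p ∈ Lu, r1.contains p.1 = false := by
    intro p hp
    have h2 := (List.mem_filter.mp (hLu ▸ hp)).2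
    rw [hr1cont p (List.mem_of_mem_filter (hLu ▸ hp))]
    simpa using h2
  have hLund : (Lu.map Prod.fst).Nodup :=
    List.Nodup.sublist (List.Sublist.map Prod.fst (hLu ▸ List.filter_sublist)) hLkeysnd
  have hA2 : (Lu.foldl (fun r p => r.insert p.1 p.2) r1).items = r1.items ++ Lu := by
    have h := PySem.Dict.items_foldl_insert_fresh Lu (fun p => p.1) (fun p => p.2) r1 hfr2 hLund
    simpa using h
  have hBnd : ((kl.map f ++ Lu).map Prod.fst).Nodup :=
    ((hperm.map Prod.fst).nodup_iff).mpr hkeysnd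
  have hB2 : ((kl.map f ++ Lu).foldl (fun r p => r.insert p.1 p.2) PySem.Dict.empty).items
      = kl.map f ++ Lu := by
    have h := PySem.Dict.items_foldl_insert_fresh (kl.map f ++ Lu) (fun p => p.1) (fun p => p.2)
      PySem.Dict.empty (fun a _ => by simp) hBnd
    simpa using h
  rw [foldl_insert_if_eq_filter, foldl_skip_contains _ _ hLkeysnd]
  show ((L.filter (fun p => !r1.contains p.1)).foldl (fun r p => r.insert p.1 p.2) r1).items
      = ((PySem.List.sorted c.items fun p => pvRankOf p.1).foldl
          (fun r p => r.insert p.1 p.2) PySem.Dict.empty).items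
  rw [hfe, hM]
  exact hA2.trans (by rw [hr1items]; exact hB2.symm)

-- ===== VERDICT (by name: the statement is the Claim_ definition above) =====
theorem severity_breakdown_py_spec : Claim_equal_severity_breakdown_py := by
  intro incidents _
  unfold Spec_severity_breakdown_py
  exact severity_breakdown_core incidents
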